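-- pv_equiv track=rewrite | github.com/drothermel/genfxn | src/genfxn/irt/stratification.py | _transform_complexity_from_kinds
-- ===== SOURCE A (Python) =====
-- def _transform_complexity_from_kinds(kinds: list[str]) -> str:
--     if not kinds:
--         return "low"
--     if any(kind == "scale" for kind in kinds):
--         return "high"
--     if any(kind in {"abs", "shift"} for kind in kinds):
--         return "mixed"
--     if all(kind in {"identity", "negate"} for kind in kinds):
--         return "low"
--     return "mixed"
-- ===== SOURCE B (Python) =====
-- _SEVERITY = {"scale": 2, "identity": 0, "negate": 0}
--
-- def _transform_complexity_from_kinds(kinds: list[str]) -> str: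
--     if not kinds:
--         return "low"
--     m = max(_SEVERITY.get(kind, 1) for kind in kinds)
--     if m == 2:
--         return "high"
--     if m == 1:
--         return "mixed"
--     return "low"
-- ===== Notes on version B (the rewrite author's own statement) =====
-- stated objective: alternative
-- what changed: Replaces A's ordered any/any/all cascade (up to three passes over the list) with a table-driven single-pass max of per-kind severities (scale=2, identity/negate=0, other=1) translated back to a label.
import Mathlib
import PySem

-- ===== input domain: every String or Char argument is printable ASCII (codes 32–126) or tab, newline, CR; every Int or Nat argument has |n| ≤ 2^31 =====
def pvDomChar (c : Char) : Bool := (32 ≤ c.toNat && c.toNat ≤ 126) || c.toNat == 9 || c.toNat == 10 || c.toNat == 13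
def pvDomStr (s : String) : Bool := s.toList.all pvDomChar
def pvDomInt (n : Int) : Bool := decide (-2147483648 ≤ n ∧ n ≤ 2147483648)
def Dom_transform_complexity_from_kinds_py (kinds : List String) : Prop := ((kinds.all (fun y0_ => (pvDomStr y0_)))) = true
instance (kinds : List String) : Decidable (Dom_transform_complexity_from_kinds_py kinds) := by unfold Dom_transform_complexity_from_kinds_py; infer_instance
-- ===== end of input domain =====

-- B replaces A's any/any/all cascade with a single-pass table-driven max of severities; same cost, different decomposition.

-- ===== PORT A =====
def transform_complexity_from_kinds_py (kinds : List String) : String :=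
  if kinds = [] then "low"
  else if kinds.any (fun kind => kind == "scale") then "high"
  else if kinds.any (fun kind => kind == "abs" || kind == "shift") then "mixed"
  else if kinds.all (fun kind => kind == "identity" || kind == "negate") then "low"
  else "mixed"

-- ===== PORT B =====
-- severity table: scale→2, identity/negate→0, anything else→1  (dict .get with default 1)
def pvSeverity (kind : String) : Nat :=
  if kind == "scale" then 2
  else if kind == "identity" || kind == "negate" then 0
  else 1

def transform_complexity_from_kinds_py_alt (kinds : List String) : String :=
  if kinds = [] then "low"
  else
    let m := kinds.foldl (fun a kind => Nat.max a (pvSeverity kind)) 0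
    if m = 2 then "high"
    else if m = 1 then "mixed"
    else "low"

-- ===== PRECONDITION & SPEC =====
def Spec_transform_complexity_from_kinds_py (kinds : List String) (out : String) : Prop := out = transform_complexity_from_kinds_py_alt kinds
instance (kinds : List String) (out : String) : Decidable (Spec_transform_complexity_from_kinds_py kinds out) := by unfold Spec_transform_complexity_from_kinds_py; infer_instance

-- ===== CLAIM (what is proved, stated in full; the proofs are below) =====
def Claim_equal_transform_complexity_from_kinds_py : Prop := ∀ (kinds : List String), Dom_transform_complexity_from_kinds_py kinds → Spec_transform_complexity_from_kinds_py kinds (transform_complexity_from_kinds_py kinds)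

-- ===== LEMMAS AND PROOFS =====

def pvMaxSev (kinds : List String) : Nat :=
  kinds.foldl (fun a kind => Nat.max a (pvSeverity kind)) 0

theorem pvFoldl_max (kinds : List String) (a : Nat) :
    kinds.foldl (fun a kind => Nat.max a (pvSeverity kind)) a = Nat.max a (pvMaxSev kinds) := by
  induction kinds generalizing a with
  | nil => simp [pvMaxSev]
  | cons k t ih =>
    simp only [List.foldl_cons, pvMaxSev]
    rw [ih, ih (Nat.max 0 (pvSeverity k))]
    simp [Nat.max_assoc]

theorem pvMaxSev_cons (k : String) (t : List String) :
    pvMaxSev (k :: t) = Nat.max (pvSeverity k) (pvMaxSev t) := by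
  simp only [pvMaxSev, List.foldl_cons]
  rw [pvFoldl_max]
  simp [pvMaxSev]

theorem pvMaxCases (a b : Nat) : (b ≤ a ∧ Nat.max a b = a) ∨ (a ≤ b ∧ Nat.max a b = b) := by
  rcases Nat.le_total b a with h | h
  · left; exact ⟨h, Nat.max_eq_left h⟩
  · right; exact ⟨h, Nat.max_eq_right h⟩

theorem pvSeverity_le (k : String) : pvSeverity k ≤ 2 := by
  unfold pvSeverity; split_ifs <;> omega

theorem pvMaxSev_le (kinds : List String) : pvMaxSev kinds ≤ 2 := by
  induction kinds with
  | nil => simp [pvMaxSev]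
  | cons k t ih =>
    rw [pvMaxSev_cons]
    exact Nat.max_le.mpr ⟨pvSeverity_le k, ih⟩

theorem pvMaxSev_two_iff (kinds : List String) :
    pvMaxSev kinds = 2 ↔ kinds.any (fun kind => kind == "scale") = true := by
  induction kinds with
  | nil => simp [pvMaxSev]
  | cons k t ih =>
    rw [pvMaxSev_cons]
    simp only [List.any_cons, Bool.or_eq_true]
    have hcs := pvMaxCases (pvSeverity k) (pvMaxSev t)
    constructor
    · intro h
      by_cases hk : (k == "scale") = true
      · exact Or.inl hk
      · right
        apply ih.mp
        have hs : pvSeverity k ≤ 1 := by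
          unfold pvSeverity
          rw [if_neg hk]
          split_ifs <;> omega
        rcases hcs with ⟨hle, hc⟩ | ⟨hle, hc⟩ <;> omega
    · rintro (hk | ht)
      · have h2 : pvSeverity k = 2 := by unfold pvSeverity; rw [if_pos hk]
        have := pvMaxSev_le t
        rcases hcs with ⟨hle, hc⟩ | ⟨hle, hc⟩ <;> omega
      · have := ih.mpr ht
        have := pvSeverity_le k
        rcases hcs with ⟨hle, hc⟩ | ⟨hle, hc⟩ <;> omega

theorem pvMaxSev_zero_iff (kinds : List String) :
    pvMaxSev kinds = 0 ↔ kinds.all (fun kind => kind == "identity" || kind == "negate") = true := by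
  induction kinds with
  | nil => simp [pvMaxSev]
  | cons k t ih =>
    rw [pvMaxSev_cons]
    simp only [List.all_cons, Bool.and_eq_true]
    have hcs := pvMaxCases (pvSeverity k) (pvMaxSev t)
    constructor
    · intro h
      have hk : pvSeverity k = 0 := by
        rcases hcs with ⟨hle, hc⟩ | ⟨hle, hc⟩ <;> omega
      have ht : pvMaxSev t = 0 := by
        rcases hcs with ⟨hle, hc⟩ | ⟨hle, hc⟩ <;> omega
      refine ⟨?_, ih.mp ht⟩
      unfold pvSeverity at hk
      split_ifs at hk <;> simp_all
    · rintro ⟨hk, ht⟩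
      have h1 : pvSeverity k = 0 := by
        unfold pvSeverity
        have : (k == "scale") = false := by
          rcases Bool.or_eq_true _ _ |>.mp hk with h | h <;>
            simp_all
        rw [this]; simp [hk]
      have h2 := ih.mpr ht
      rcases hcs with ⟨hle, hc⟩ | ⟨hle, hc⟩ <;> omega

-- ===== VERDICT (by name: the statement is the Claim_ definition above) =====
theorem transform_complexity_from_kinds_py_spec : Claim_equal_transform_complexity_from_kinds_py := by
  intro kinds _
  unfold Spec_transform_complexity_from_kinds_py
  unfold transform_complexity_from_kinds_py transform_complexity_from_kinds_py_alt
  by_cases hnil : kinds = []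
  · simp [hnil]
  rw [if_neg hnil, if_neg hnil]
  show _ = (if pvMaxSev kinds = 2 then "high" else if pvMaxSev kinds = 1 then "mixed" else "low")
  by_cases hscale : kinds.any (fun kind => kind == "scale") = true
  · rw [if_pos hscale, if_pos ((pvMaxSev_two_iff kinds).mpr hscale)]
  · rw [if_neg hscale]
    have h2 : pvMaxSev kinds ≠ 2 := fun h => hscale ((pvMaxSev_two_iff kinds).mp h)
    rw [if_neg h2]
    by_cases hall : kinds.all (fun kind => kind == "identity" || kind == "negate") = true
    · have h0 := (pvMaxSev_zero_iff kinds).mpr hall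
      have habs : kinds.any (fun kind => kind == "abs" || kind == "shift") = false := by
        rw [Bool.eq_false_iff]
        intro hany
        rcases List.any_eq_true.mp hany with ⟨k, hk, hkv⟩
        have hkid := List.all_eq_true.mp hall k hk
        rcases Bool.or_eq_true _ _ |>.mp hkv with h | h <;>
          rcases Bool.or_eq_true _ _ |>.mp hkid with h' | h' <;> simp_all
      simp [habs, hall, h0]
    · have h0 : pvMaxSev kinds ≠ 0 := fun h => hall ((pvMaxSev_zero_iff kinds).mp h)
      have h1 : pvMaxSev kinds = 1 := by have := pvMaxSev_le kinds; omega
      rw [if_pos h1]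
      rw [if_neg hall]
      split <;> rfl
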